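-- pv_equiv track=rewrite | github.com/molgenis/NGS_CNV | scripts/comparison/comparison.py | determine_unique_array_cnvs
-- ===== SOURCE A (Python) =====
-- def determine_unique_array_cnvs(found_array_cnv_data):
--     """Determine which array CNVs are unique for each tool.
--
--     Parameters
--     ----------
--     found_array_cnv_data : dict
--         Array CNVs found by both tools
--
--     Returns
--     -------
--     unique_array_cnvs : dict
--         Found array CNVs unique to each tool
--     """
--     unique_array_cnvs = {"tool1": {}, "tool2": {}}
--     for samplename in set(found_array_cnv_data["tool1"].keys()) | set(found_array_cnv_data["tool2"].keys()):
--         tool1_acnvs, tool2_acnvs = set(), set()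
--
--         # Gather the array CNVs found for the current sample.
--         if samplename in found_array_cnv_data["tool1"]:
--             tool1_acnvs = set(found_array_cnv_data["tool1"][samplename])
--         if samplename in found_array_cnv_data["tool2"]:
--             tool2_acnvs = set(found_array_cnv_data["tool2"][samplename])
--
--         # Determine the unique array CNVs for both tools
--         tool1_unique_acnvs = tool1_acnvs - tool2_acnvs
--         tool2_unique_acnvs = tool2_acnvs - tool1_acnvs
--
--         # Save the unique array CNVs
--         if len(tool1_unique_acnvs) > 0:
--             unique_array_cnvs["tool1"][samplename] = tool1_unique_acnvs
--         if len(tool2_unique_acnvs) > 0: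
--             unique_array_cnvs["tool2"][samplename] = tool2_unique_acnvs
--     return unique_array_cnvs
-- ===== SOURCE B (Python) =====
-- def determine_unique_array_cnvs(found_array_cnv_data):
--     """Found array CNVs unique to each tool, via an inverted occurrence index:
--     one tagging pass records per (sample, cnv) which tools saw it, then a sweep
--     keeps the singly-seen ones. No set subtraction anywhere."""
--     # sample -> cnv -> (seen_by_tool1, seen_by_tool2)
--     seen = {}
--     for sample, cnvs in found_array_cnv_data["tool1"].items():
--         flags = seen.setdefault(sample, {})
--         for cnv in cnvs:
--             flags[cnv] = (True, False)
--     for sample, cnvs in found_array_cnv_data["tool2"].items():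
--         flags = seen.setdefault(sample, {})
--         for cnv in cnvs:
--             flags[cnv] = (flags.get(cnv, (False, False))[0], True)
--     unique_array_cnvs = {"tool1": {}, "tool2": {}}
--     for sample, flags in seen.items():
--         for cnv, (in1, in2) in flags.items():
--             if in1 != in2:
--                 unique_array_cnvs["tool1" if in1 else "tool2"].setdefault(sample, set()).add(cnv)
--     return unique_array_cnvs
-- ===== Notes on version B (the rewrite author's own statement) =====
-- stated objective: alternative
-- what changed: A's per-sample set-subtraction loop over the union of sample names is replaced by an inverted occurrence index: one tagging pass records for every (sample, cnv) pair which tools reported it, and a final sweep emits the pairs seen by exactly one tool; no set difference is computed anywhere.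
import Mathlib
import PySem

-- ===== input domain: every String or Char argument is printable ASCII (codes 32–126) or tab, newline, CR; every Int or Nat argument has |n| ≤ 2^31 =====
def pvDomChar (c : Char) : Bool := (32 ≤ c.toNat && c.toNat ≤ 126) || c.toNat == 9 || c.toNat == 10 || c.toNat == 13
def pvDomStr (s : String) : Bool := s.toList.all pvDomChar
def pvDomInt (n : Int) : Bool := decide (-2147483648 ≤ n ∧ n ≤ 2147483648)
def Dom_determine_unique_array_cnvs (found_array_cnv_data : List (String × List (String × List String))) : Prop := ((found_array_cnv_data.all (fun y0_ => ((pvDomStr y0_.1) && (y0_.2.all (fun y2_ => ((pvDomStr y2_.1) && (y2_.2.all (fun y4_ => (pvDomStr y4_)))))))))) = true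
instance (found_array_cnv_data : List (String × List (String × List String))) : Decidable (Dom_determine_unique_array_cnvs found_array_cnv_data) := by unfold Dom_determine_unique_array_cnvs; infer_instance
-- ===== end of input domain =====

-- B replaces A's per-sample set-subtraction over the union of sample names by an inverted
-- occurrence index: one pass tags every (sample, cnv) pair with the tools that saw it, a sweep
-- keeps the singly-tagged pairs (objective: alternative algorithm, same asymptotic cost).
-- Python iterates a set in unspecified hash order and dict/set outputs are compared ignoring
-- order; the ports fix the deterministic first-seen order on both sides.

-- ===== PORT A =====
def determine_unique_array_cnvs (found_array_cnv_data : List (String × List (String × List String))) : List (String × List (String × List String)) :=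
  -- found_array_cnv_data["tool1"] / ["tool2"]: KeyError (= none) is excluded by Pre_
  match (PySem.Dict.mk found_array_cnv_data).get? "tool1", (PySem.Dict.mk found_array_cnv_data).get? "tool2" with
  | some tool1_data, some tool2_data =>
    -- for samplename in set(tool1.keys()) | set(tool2.keys())  (set order: first-seen)
    let samples : PySem.Set String :=
      PySem.Set.union (PySem.Set.ofList (PySem.Dict.mk tool1_data).keys)
        (PySem.Set.ofList (PySem.Dict.mk tool2_data).keys)
    let result :=
      samples.foldl
        (fun (acc : PySem.Dict String (List String) × PySem.Dict String (List String)) samplename =>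
          let tool1_acnvs : PySem.Set String :=
            match (PySem.Dict.mk tool1_data).get? samplename with
            | some v => PySem.Set.ofList v
            | none => PySem.Set.empty
          let tool2_acnvs : PySem.Set String :=
            match (PySem.Dict.mk tool2_data).get? samplename with
            | some v => PySem.Set.ofList v
            | none => PySem.Set.empty
          let tool1_unique_acnvs := PySem.Set.diff tool1_acnvs tool2_acnvs
          let tool2_unique_acnvs := PySem.Set.diff tool2_acnvs tool1_acnvs
          (if PySem.Set.len tool1_unique_acnvs > 0 then acc.1.insert samplename tool1_unique_acnvs else acc.1,
           if PySem.Set.len tool2_unique_acnvs > 0 then acc.2.insert samplename tool2_unique_acnvs else acc.2))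
        (PySem.Dict.empty, PySem.Dict.empty)
    [("tool1", result.1.items), ("tool2", result.2.items)]
  | _, _ => []

-- ===== PORT B =====
def determine_unique_array_cnvs_alt (found_array_cnv_data : List (String × List (String × List String))) : List (String × List (String × List String)) :=
  -- found_array_cnv_data["tool1"] / ["tool2"]: KeyError (= none) is excluded by Pre_
  match (PySem.Dict.mk found_array_cnv_data).get? "tool1" with
  | none => []
  | some tool1 =>
    match (PySem.Dict.mk found_array_cnv_data).get? "tool2" with
    | none => []
    | some tool2 =>
    -- seen: sample -> cnv -> (seen_by_tool1, seen_by_tool2)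
    -- for sample, cnvs in tool1.items(): flags = seen.setdefault(sample, {}); for cnv: flags[cnv] = (True, False)
    -- (setdefault-then-mutate-in-place = re-insert of the updated inner dict: overwrite keeps position, new keys append)
    let seen1 : PySem.Dict String (PySem.Dict String (Bool × Bool)) :=
      tool1.foldl
        (fun seen sc =>
          seen.insert sc.1
            (sc.2.foldl (fun (flags : PySem.Dict String (Bool × Bool)) cnv => flags.insert cnv (true, false))
              (seen.getD sc.1 PySem.Dict.empty)))
        PySem.Dict.empty
    -- for sample, cnvs in tool2.items(): flags = seen.setdefault(sample, {}); for cnv: flags[cnv] = (flags.get(cnv,(F,F))[0], True)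
    let seen2 : PySem.Dict String (PySem.Dict String (Bool × Bool)) :=
      tool2.foldl
        (fun seen sc =>
          seen.insert sc.1
            (sc.2.foldl (fun (flags : PySem.Dict String (Bool × Bool)) cnv =>
                flags.insert cnv ((flags.getD cnv (false, false)).1, true))
              (seen.getD sc.1 PySem.Dict.empty)))
        seen1
    -- unique = {"tool1": {}, "tool2": {}}; for sample, flags in seen.items(): for cnv, (in1, in2) in flags.items():
    --   if in1 != in2: unique["tool1" if in1 else "tool2"].setdefault(sample, set()).add(cnv)
    let unique :=
      seen2.items.foldl
        (fun (u : PySem.Dict String (PySem.Set String) × PySem.Dict String (PySem.Set String)) sf =>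
          sf.2.items.foldl
            (fun (u : PySem.Dict String (PySem.Set String) × PySem.Dict String (PySem.Set String)) cf =>
              if cf.2.1 != cf.2.2 then
                if cf.2.1 then
                  (u.1.insert sf.1 (PySem.Set.add (u.1.getD sf.1 PySem.Set.empty) cf.1), u.2)
                else
                  (u.1, u.2.insert sf.1 (PySem.Set.add (u.2.getD sf.1 PySem.Set.empty) cf.1))
              else u)
            u)
        (PySem.Dict.empty, PySem.Dict.empty)
    [("tool1", unique.1.items), ("tool2", unique.2.items)]

-- ===== PRECONDITION & SPEC =====
-- A raises KeyError unless both "tool1" and "tool2" are present; and a tool's inner association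
-- list must have distinct sample keys, since duplicate keys do not represent any Python dict input.
def Pre_determine_unique_array_cnvs (found_array_cnv_data : List (String × List (String × List String))) : Prop :=
  (PySem.Dict.mk found_array_cnv_data).contains "tool1" = true ∧
  (PySem.Dict.mk found_array_cnv_data).contains "tool2" = true ∧
  (((PySem.Dict.mk found_array_cnv_data).getD "tool1" []).map Prod.fst).Nodup ∧
  (((PySem.Dict.mk found_array_cnv_data).getD "tool2" []).map Prod.fst).Nodup
instance (found_array_cnv_data : List (String × List (String × List String))) : Decidable (Pre_determine_unique_array_cnvs found_array_cnv_data) := by unfold Pre_determine_unique_array_cnvs; infer_instance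

def pvWitness_determine_unique_array_cnvs : (List (String × List (String × List String))) :=
  [("tool1", [("s1", ["a", "b"])]), ("tool2", [("s1", ["b", "c"]), ("s2", ["d"])])]

def Spec_determine_unique_array_cnvs (found_array_cnv_data : List (String × List (String × List String))) (out : List (String × List (String × List String))) : Prop := out = determine_unique_array_cnvs_alt found_array_cnv_data
instance (found_array_cnv_data : List (String × List (String × List String))) (out : List (String × List (String × List String))) : Decidable (Spec_determine_unique_array_cnvs found_array_cnv_data out) := by unfold Spec_determine_unique_array_cnvs; infer_instance

-- ===== CLAIM (what is proved, stated in full; the proofs are below) =====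
def Claim_equal_determine_unique_array_cnvs : Prop := ∀ (found_array_cnv_data : List (String × List (String × List String))), Dom_determine_unique_array_cnvs found_array_cnv_data → Pre_determine_unique_array_cnvs found_array_cnv_data → Spec_determine_unique_array_cnvs found_array_cnv_data (determine_unique_array_cnvs found_array_cnv_data)

-- ===== LEMMAS AND PROOFS =====

-- per-sample CNV list a tool reports: tool.get(s, [])
def pvGetL (t : List (String × List String)) (s : String) : List String :=
  (PySem.Dict.mk t).getD s []

-- per-sample value A gathers: set(tool[s]) if s in tool else set()
def pvAset (t : List (String × List String)) (s : String) : PySem.Set String :=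
  match (PySem.Dict.mk t).get? s with
  | some v => PySem.Set.ofList v
  | none => PySem.Set.empty

theorem pvAset_eq_ofList_getL (t : List (String × List String)) (s : String) :
    pvAset t s = PySem.Set.ofList (pvGetL t s) := by
  unfold pvAset pvGetL
  cases h : (PySem.Dict.mk t).get? s <;>
    simp [PySem.Dict.getD_eq_get?_getD, h, PySem.Set.ofList_nil, PySem.Set.empty]

-- flags dict after B's first tagging pass over one sample's CNV list
def pvF1 (cs : List String) : PySem.Dict String (Bool × Bool) :=
  cs.foldl (fun (flags : PySem.Dict String (Bool × Bool)) cnv => flags.insert cnv (true, false))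
    PySem.Dict.empty

-- flags dict after B's second tagging pass over one sample's CNV list
def pvG (f : PySem.Dict String (Bool × Bool)) (cs : List String) : PySem.Dict String (Bool × Bool) :=
  cs.foldl (fun (flags : PySem.Dict String (Bool × Bool)) cnv =>
      flags.insert cnv ((flags.getD cnv (false, false)).1, true)) f

theorem pvF1_items (cs : List String) :
    (pvF1 cs).items = (PySem.Set.ofList cs).map (fun c => (c, (true, false))) := by
  induction cs using List.reverseRecOn with
  | nil => rfl
  | append_singleton cs c ih =>
    show ((cs ++ [c]).foldl (fun (flags : PySem.Dict String (Bool × Bool)) cnv => flags.insert cnv (true, false))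
      PySem.Dict.empty).items = _
    rw [List.foldl_append, List.foldl_cons, List.foldl_nil, PySem.Set.ofList_append_singleton]
    have hk : (cs.foldl (fun (flags : PySem.Dict String (Bool × Bool)) cnv => flags.insert cnv (true, false))
        PySem.Dict.empty).keys = PySem.Set.ofList cs := by
      rw [PySem.Dict.keys_foldl_insert cs (fun _ _ => (true, false)) PySem.Dict.empty]
      simp [PySem.Dict.keys_empty, PySem.Set.update_nil_left]
    have ih' : (cs.foldl (fun (flags : PySem.Dict String (Bool × Bool)) cnv => flags.insert cnv (true, false))
        PySem.Dict.empty).items = (PySem.Set.ofList cs).map (fun c => (c, (true, false))) := ih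
    by_cases hc : c ∈ cs
    · have hcont : (cs.foldl (fun (flags : PySem.Dict String (Bool × Bool)) cnv => flags.insert cnv (true, false))
          PySem.Dict.empty).contains c = true := by
        rw [PySem.Dict.contains_iff_mem_keys, hk, PySem.Set.mem_ofList]; exact hc
      rw [PySem.Dict.items_insert_of_contains _ _ hcont, ih',
        PySem.Set.add_of_mem (by rwa [PySem.Set.mem_ofList]), List.map_map]
      refine List.map_congr_left ?_
      intro x _
      by_cases hx : x = c <;> simp [hx]
    · have hcont : (cs.foldl (fun (flags : PySem.Dict String (Bool × Bool)) cnv => flags.insert cnv (true, false))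
          PySem.Dict.empty).contains c = false := by
        rw [← Bool.not_eq_true, PySem.Dict.contains_iff_mem_keys, hk, PySem.Set.mem_ofList]; exact hc
      rw [PySem.Dict.items_insert_of_not_contains _ _ hcont, ih',
        PySem.Set.add_of_not_mem (by rwa [PySem.Set.mem_ofList])]
      simp

theorem pvF1_keys (cs : List String) : (pvF1 cs).keys = PySem.Set.ofList cs := by
  show (pvF1 cs).items.map Prod.fst = _
  rw [pvF1_items, List.map_map]
  simp [Function.comp_def]

theorem pvG_keys (cs1 cs2 : List String) :
    (pvG (pvF1 cs1) cs2).keys = PySem.Set.update (PySem.Set.ofList cs1) cs2 := by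
  unfold pvG
  rw [PySem.Dict.keys_foldl_insert cs2 (fun flags cnv => ((flags.getD cnv (false, false)).1, true)) (pvF1 cs1),
    pvF1_keys]

theorem pvG_nodup_keys (cs1 cs2 : List String) : (pvG (pvF1 cs1) cs2).keys.Nodup := by
  rw [pvG_keys]
  exact PySem.Set.nodup_update _ _ (PySem.Set.nodup_ofList cs1)

-- the inverted index of one sample: tool1's CNVs with their tool2 flag, then tool2-only CNVs
theorem pvG_items (cs1 cs2 : List String) :
    (pvG (pvF1 cs1) cs2).items =
      (PySem.Set.ofList cs1).map (fun c => (c, (true, cs2.contains c)))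
        ++ (PySem.Set.diff (PySem.Set.ofList cs2) (PySem.Set.ofList cs1)).map (fun c => (c, (false, true))) := by
  induction cs2 using List.reverseRecOn with
  | nil =>
    rw [show pvG (pvF1 cs1) [] = pvF1 cs1 from rfl, pvF1_items]
    simp [PySem.Set.diff]
  | append_singleton cs2 c ih =>
    have hstep : pvG (pvF1 cs1) (cs2 ++ [c]) =
        (pvG (pvF1 cs1) cs2).insert c (((pvG (pvF1 cs1) cs2).getD c (false, false)).1, true) := by
      unfold pvG; rw [List.foldl_append, List.foldl_cons, List.foldl_nil]
    have hcont : (pvG (pvF1 cs1) cs2).contains c = true ↔ (c ∈ cs1 ∨ c ∈ cs2) := by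
      rw [PySem.Dict.contains_iff_mem_keys, pvG_keys, PySem.Set.mem_update, PySem.Set.mem_ofList]
    by_cases hc1 : c ∈ cs1
    · -- c is a tool1 CNV: its entry sits in the first block and is overwritten in place
      have hmem : (c, (true, cs2.contains c)) ∈ (pvG (pvF1 cs1) cs2).items := by
        rw [ih]
        exact List.mem_append_left _ (List.mem_map_of_mem ((PySem.Set.mem_ofList _ _).mpr hc1))
      have hget : (pvG (pvF1 cs1) cs2).getD c (false, false) = (true, cs2.contains c) :=
        PySem.Dict.getD_of_mem_items _ hmem (pvG_nodup_keys cs1 cs2) _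
      rw [hstep, hget, PySem.Dict.items_insert_of_contains _ _ (hcont.mpr (Or.inl hc1)), ih,
        List.map_append, List.map_map]
      congr 1
      · refine List.map_congr_left ?_
        intro x hx
        by_cases hxc : x = c
        · subst hxc; simp
        · simp only [Function.comp_apply, beq_iff_eq, hxc, if_false]
          simp [hxc]
      · have hdiff : PySem.Set.diff (PySem.Set.ofList (cs2 ++ [c])) (PySem.Set.ofList cs1) =
            PySem.Set.diff (PySem.Set.ofList cs2) (PySem.Set.ofList cs1) := by
          rw [PySem.Set.ofList_append_singleton]
          by_cases hc2 : c ∈ cs2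
          · rw [PySem.Set.add_of_mem ((PySem.Set.mem_ofList _ _).mpr hc2)]
          · rw [PySem.Set.add_of_not_mem (fun h => hc2 ((PySem.Set.mem_ofList _ _).mp h))]
            show List.filter _ (PySem.Set.ofList cs2 ++ [c]) = _
            rw [List.filter_append]
            have hf : List.filter (fun x => !PySem.Set.contains (PySem.Set.ofList cs1) x) [c] = [] := by
              simp [PySem.Set.contains_eq_listContains]
              simpa using hc1
            rw [hf, List.append_nil]
            rfl
        rw [hdiff, List.map_map]
        refine List.map_congr_left ?_
        intro x hx
        have hx1 : x ∉ cs1 := by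
          have := (PySem.Set.mem_diff _ _ _).mp hx
          exact fun h => this.2 ((PySem.Set.mem_ofList _ _).mpr h)
        have hxc : x ≠ c := fun h => hx1 (h ▸ hc1)
        simp [hxc]
    · have hxne : c ∉ PySem.Set.ofList cs1 := fun h => hc1 ((PySem.Set.mem_ofList _ _).mp h)
      by_cases hc2 : c ∈ cs2
      · -- c already tagged as tool2-only: overwritten in place with the same flags
        have hmemd : c ∈ PySem.Set.diff (PySem.Set.ofList cs2) (PySem.Set.ofList cs1) :=
          (PySem.Set.mem_diff _ _ _).mpr ⟨(PySem.Set.mem_ofList _ _).mpr hc2, hxne⟩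
        have hmem : (c, ((false : Bool), (true : Bool))) ∈ (pvG (pvF1 cs1) cs2).items := by
          rw [ih]
          exact List.mem_append_right _ (List.mem_map_of_mem hmemd)
        have hget : (pvG (pvF1 cs1) cs2).getD c (false, false) = (false, true) :=
          PySem.Dict.getD_of_mem_items _ hmem (pvG_nodup_keys cs1 cs2) _
        rw [hstep, hget, PySem.Dict.items_insert_of_contains _ _ (hcont.mpr (Or.inr hc2)), ih,
          List.map_append, List.map_map, List.map_map]
        have hdiff : PySem.Set.diff (PySem.Set.ofList (cs2 ++ [c])) (PySem.Set.ofList cs1) =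
            PySem.Set.diff (PySem.Set.ofList cs2) (PySem.Set.ofList cs1) := by
          rw [PySem.Set.ofList_append_singleton, PySem.Set.add_of_mem ((PySem.Set.mem_ofList _ _).mpr hc2)]
        rw [hdiff]
        congr 1
        · refine List.map_congr_left ?_
          intro x hx
          have hxc : x ≠ c := fun h => hc1 (h ▸ ((PySem.Set.mem_ofList _ _).mp hx))
          simp only [Function.comp_apply, beq_iff_eq, hxc, if_false]
          simp [hxc]
        · refine List.map_congr_left ?_
          intro x hx
          by_cases hxc : x = c
          · subst hxc; simp
          · simp [hxc]
      · -- a fresh (sample, cnv) pair: appended at the end of the tool2-only block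
        have hcontf : (pvG (pvF1 cs1) cs2).contains c = false := by
          rw [← Bool.not_eq_true, hcont]
          tauto
        rw [hstep, PySem.Dict.getD_of_not_contains _ _ hcontf,
          PySem.Dict.items_insert_of_not_contains _ _ hcontf, ih]
        have hdiff : PySem.Set.diff (PySem.Set.ofList (cs2 ++ [c])) (PySem.Set.ofList cs1) =
            PySem.Set.diff (PySem.Set.ofList cs2) (PySem.Set.ofList cs1) ++ [c] := by
          rw [PySem.Set.ofList_append_singleton,
            PySem.Set.add_of_not_mem (fun h => hc2 ((PySem.Set.mem_ofList _ _).mp h))]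
          show List.filter _ (PySem.Set.ofList cs2 ++ [c]) = _
          rw [List.filter_append]
          have hf : List.filter (fun x => !PySem.Set.contains (PySem.Set.ofList cs1) x) [c] = [c] := by
            simp [PySem.Set.contains_eq_listContains]
            simpa using hc1
          rw [hf]
          rfl
        rw [hdiff, List.map_append]
        have hfirst : (PySem.Set.ofList cs1).map (fun x => (x, (true, (cs2 ++ [c]).contains x))) =
            (PySem.Set.ofList cs1).map (fun x => (x, (true, cs2.contains x))) := by
          refine List.map_congr_left ?_
          intro x hx
          have hxc : x ≠ c := fun h => hc1 (h ▸ ((PySem.Set.mem_ofList _ _).mp hx))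
          simp [hxc]
        rw [hfirst, List.append_assoc]
        rfl

-- a fold that only writes key s accumulates one Set.update at s
theorem pv_foldl_add_insert (l : List String) (s : String) (u : PySem.Dict String (PySem.Set String)) :
    l.foldl (fun u c => u.insert s (PySem.Set.add (u.getD s PySem.Set.empty) c)) u =
      if l = [] then u else u.insert s (PySem.Set.update (u.getD s PySem.Set.empty) l) := by
  induction l generalizing u with
  | nil => rfl
  | cons c l ih =>
    rw [List.foldl_cons, ih]
    by_cases hl : l = []
    · subst hl
      simp [PySem.Set.update_cons, PySem.Set.update_nil]
    · simp only [hl, if_false]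
      rw [PySem.Dict.getD_insert_self, PySem.Dict.insert_insert_self, PySem.Set.update_cons]
      simp

-- generic lookup through an insert-with-getD pass over an association list
theorem pv_getD_pass_notmem {ν : Type} (t : List (String × List String)) (g : ν → List String → ν)
    (v0 : ν) (s : String) (h : s ∉ t.map Prod.fst) (d : PySem.Dict String ν) :
    (t.foldl (fun d sc => d.insert sc.1 (g (d.getD sc.1 v0) sc.2)) d).getD s v0 = d.getD s v0 := by
  induction t generalizing d with
  | nil => rfl
  | cons sc t ih =>
    simp only [List.map_cons, List.mem_cons, not_or] at h
    rw [List.foldl_cons, ih h.2, PySem.Dict.getD_insert_of_ne _ _ _ h.1]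

theorem pv_getD_pass {ν : Type} (t : List (String × List String)) (g : ν → List String → ν)
    (v0 : ν) (s : String) (hn : (t.map Prod.fst).Nodup) (d : PySem.Dict String ν) :
    (t.foldl (fun d sc => d.insert sc.1 (g (d.getD sc.1 v0) sc.2)) d).getD s v0 =
      (match (PySem.Dict.mk t).get? s with
       | some cs => g (d.getD s v0) cs
       | none => d.getD s v0) := by
  induction t generalizing d with
  | nil => rfl
  | cons sc t ih =>
    simp only [List.map_cons, List.nodup_cons] at hn
    rw [List.foldl_cons, PySem.Dict.get?_mk_cons]
    by_cases hs : sc.1 = s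
    · subst hs
      simp only [beq_self_eq_true, if_pos]
      rw [pv_getD_pass_notmem t g v0 sc.1 hn.1 _, PySem.Dict.getD_insert_self]
    · rw [ih hn.2]
      have hb : (sc.1 == s) = false := by simp [hs]
      rw [hb]
      simp only [Bool.false_eq_true, if_false]
      rw [PySem.Dict.getD_insert_of_ne _ _ _ (Ne.symm hs)]

theorem pv_contains_ofList (xs : List String) (x : String) :
    PySem.Set.contains (PySem.Set.ofList xs) x = xs.contains x := by
  by_cases h : x ∈ xs <;> simp [h, PySem.Set.mem_ofList]

-- B's sweep over one sample's flags = A's two conditional inserts for that sample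
theorem pv_inner (t1 t2 : List (String × List String)) (s : String)
    (u1 u2 : PySem.Dict String (PySem.Set String))
    (h1 : u1.contains s = false) (h2 : u2.contains s = false) :
    (pvG (pvF1 (pvGetL t1 s)) (pvGetL t2 s)).items.foldl
        (fun (u : PySem.Dict String (PySem.Set String) × PySem.Dict String (PySem.Set String)) cf =>
          if cf.2.1 != cf.2.2 then
            if cf.2.1 then
              (u.1.insert s (PySem.Set.add (u.1.getD s PySem.Set.empty) cf.1), u.2)
            else
              (u.1, u.2.insert s (PySem.Set.add (u.2.getD s PySem.Set.empty) cf.1))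
          else u)
        (u1, u2) =
      (if PySem.Set.len (PySem.Set.diff (pvAset t1 s) (pvAset t2 s)) > 0 then
        u1.insert s (PySem.Set.diff (pvAset t1 s) (pvAset t2 s)) else u1,
       if PySem.Set.len (PySem.Set.diff (pvAset t2 s) (pvAset t1 s)) > 0 then
        u2.insert s (PySem.Set.diff (pvAset t2 s) (pvAset t1 s)) else u2) := by
  have hA1 := pvAset_eq_ofList_getL t1 s
  have hA2 := pvAset_eq_ofList_getL t2 s
  set cs1 := pvGetL t1 s with hcs1
  set cs2 := pvGetL t2 s with hcs2
  rw [pvG_items, List.foldl_append, List.foldl_map, List.foldl_map]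
  -- the tool1 block: only pairs with tool2-flag false fire, and they touch u.1 only
  have hb1 : ((PySem.Set.ofList cs1).foldl
      (fun (u : PySem.Dict String (PySem.Set String) × PySem.Dict String (PySem.Set String)) c =>
        if (c, (true, cs2.contains c)).2.1 != (c, (true, cs2.contains c)).2.2 then
          if (c, (true, cs2.contains c)).2.1 then
            (u.1.insert s (PySem.Set.add (u.1.getD s PySem.Set.empty) (c, (true, cs2.contains c)).1), u.2)
          else
            (u.1, u.2.insert s (PySem.Set.add (u.2.getD s PySem.Set.empty) (c, (true, cs2.contains c)).1))
        else u)
      (u1, u2)) =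
      ((PySem.Set.diff (PySem.Set.ofList cs1) (PySem.Set.ofList cs2)).foldl
        (fun (d : PySem.Dict String (PySem.Set String)) c =>
          d.insert s (PySem.Set.add (d.getD s PySem.Set.empty) c)) u1, u2) := by
    rw [PySem.List.foldl_congr_mem _ _
      (fun (u : PySem.Dict String (PySem.Set String) × PySem.Dict String (PySem.Set String)) c =>
        if !cs2.contains c then
          ((fun (d : PySem.Dict String (PySem.Set String)) c =>
            d.insert s (PySem.Set.add (d.getD s PySem.Set.empty) c)) u.1 c, u.2)
        else u) _
      (by intro acc x _
          cases h : cs2.contains x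
          · have hm : x ∉ cs2 := by simpa using h
            simp [hm]
          · have hm : x ∈ cs2 := by simpa using h
            simp [hm])]
    rw [PySem.List.foldl_if_eq_foldl_filter]
    rw [PySem.List.foldl_prod_mk
      (f := fun (d : PySem.Dict String (PySem.Set String)) c =>
        d.insert s (PySem.Set.add (d.getD s PySem.Set.empty) c))
      (g := fun (d : PySem.Dict String (PySem.Set String)) _ => d)]
    rw [List.foldl_fixed]
    have hfe : List.filter (fun c => !cs2.contains c) (PySem.Set.ofList cs1) =
        PySem.Set.diff (PySem.Set.ofList cs1) (PySem.Set.ofList cs2) := by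
      show _ = List.filter (fun x => !PySem.Set.contains (PySem.Set.ofList cs2) x) (PySem.Set.ofList cs1)
      exact (List.filter_congr (fun x _ => by rw [pv_contains_ofList])).symm
    rw [hfe]
  rw [hb1]
  -- the tool2-only block: every pair fires and touches u.2 only
  have hb2 : ∀ (w1 w2 : PySem.Dict String (PySem.Set String)),
      ((PySem.Set.diff (PySem.Set.ofList cs2) (PySem.Set.ofList cs1)).foldl
      (fun (u : PySem.Dict String (PySem.Set String) × PySem.Dict String (PySem.Set String)) c =>
        if (c, (false, true)).2.1 != (c, (false, true)).2.2 then
          if (c, (false, true)).2.1 then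
            (u.1.insert s (PySem.Set.add (u.1.getD s PySem.Set.empty) (c, (false, true)).1), u.2)
          else
            (u.1, u.2.insert s (PySem.Set.add (u.2.getD s PySem.Set.empty) (c, (false, true)).1))
        else u)
      (w1, w2)) =
      (w1, (PySem.Set.diff (PySem.Set.ofList cs2) (PySem.Set.ofList cs1)).foldl
        (fun (d : PySem.Dict String (PySem.Set String)) c =>
          d.insert s (PySem.Set.add (d.getD s PySem.Set.empty) c)) w2) := by
    intro w1 w2
    rw [PySem.List.foldl_congr_mem _ _
      (fun (u : PySem.Dict String (PySem.Set String) × PySem.Dict String (PySem.Set String)) c =>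
        ((fun (d : PySem.Dict String (PySem.Set String)) _ => d) u.1 c,
         (fun (d : PySem.Dict String (PySem.Set String)) c =>
            d.insert s (PySem.Set.add (d.getD s PySem.Set.empty) c)) u.2 c)) _
      (by intro acc x _; simp)]
    rw [PySem.List.foldl_prod_mk
      (f := fun (d : PySem.Dict String (PySem.Set String)) (_ : String) => d)
      (g := fun (d : PySem.Dict String (PySem.Set String)) c =>
        d.insert s (PySem.Set.add (d.getD s PySem.Set.empty) c))]
    rw [List.foldl_fixed]
  rw [hb2]
  -- both component folds collapse to one conditional insert at the fresh key s
  have hcomp : ∀ (l : PySem.Set String) (d : PySem.Dict String (PySem.Set String)),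
      l.Nodup → d.contains s = false →
      l.foldl (fun (d : PySem.Dict String (PySem.Set String)) c =>
        d.insert s (PySem.Set.add (d.getD s PySem.Set.empty) c)) d =
      (if PySem.Set.len l > 0 then d.insert s l else d) := by
    intro l d hnd hfresh
    rw [pv_foldl_add_insert, PySem.Dict.getD_of_not_contains _ _ hfresh,
      show (PySem.Set.empty : PySem.Set String) = [] from rfl,
      PySem.Set.update_nil_left, PySem.Set.ofList_eq_self_of_nodup _ hnd]
    cases l <;> simp [PySem.Set.len]
  have hnd1 : (PySem.Set.diff (PySem.Set.ofList cs1) (PySem.Set.ofList cs2)).Nodup :=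
    PySem.Set.nodup_diff _ _ (PySem.Set.nodup_ofList cs1)
  have hnd2 : (PySem.Set.diff (PySem.Set.ofList cs2) (PySem.Set.ofList cs1)).Nodup :=
    PySem.Set.nodup_diff _ _ (PySem.Set.nodup_ofList cs2)
  rw [hcomp _ _ hnd1 h1, hcomp _ _ hnd2 h2, hA1, hA2]

-- the sample order both ports iterate: tool1's keys then tool2's fresh keys
theorem pv_samples_eq (t1 t2 : List (String × List String))
    (h1 : (t1.map Prod.fst).Nodup) :
    PySem.Set.union (PySem.Set.ofList (PySem.Dict.mk t1).keys)
        (PySem.Set.ofList (PySem.Dict.mk t2).keys) =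
      PySem.Set.update (t1.map Prod.fst) (t2.map Prod.fst) := by
  show PySem.Set.update (PySem.Set.ofList (t1.map Prod.fst)) (PySem.Set.ofList (t2.map Prod.fst)) = _
  rw [PySem.Set.ofList_eq_self_of_nodup _ h1, PySem.Set.update_eq_append_filter,
    PySem.Set.update_eq_append_filter, PySem.Set.ofList_ofList]

theorem pv_seen2_items (t1 t2 : List (String × List String))
    (hn1 : (t1.map Prod.fst).Nodup) (hn2 : (t2.map Prod.fst).Nodup) :
    (t2.foldl
        (fun seen sc =>
          seen.insert sc.1
            (sc.2.foldl (fun (flags : PySem.Dict String (Bool × Bool)) cnv =>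
                flags.insert cnv ((flags.getD cnv (false, false)).1, true))
              (seen.getD sc.1 PySem.Dict.empty)))
        (t1.foldl
          (fun seen sc =>
            seen.insert sc.1
              (sc.2.foldl (fun (flags : PySem.Dict String (Bool × Bool)) cnv => flags.insert cnv (true, false))
                (seen.getD sc.1 PySem.Dict.empty)))
          PySem.Dict.empty)).items =
      (PySem.Set.update (t1.map Prod.fst) (t2.map Prod.fst)).map
        (fun s => (s, pvG (pvF1 (pvGetL t1 s)) (pvGetL t2 s))) := by
  have hk1 : (t1.foldl
      (fun seen sc =>
        seen.insert sc.1
          (sc.2.foldl (fun (flags : PySem.Dict String (Bool × Bool)) cnv => flags.insert cnv (true, false))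
            (seen.getD sc.1 PySem.Dict.empty)))
      PySem.Dict.empty).keys = t1.map Prod.fst := by
    refine (PySem.Dict.keys_foldl_insert_key t1 Prod.fst
      (fun seen sc => sc.2.foldl (fun (flags : PySem.Dict String (Bool × Bool)) cnv => flags.insert cnv (true, false))
        (seen.getD sc.1 PySem.Dict.empty)) PySem.Dict.empty).trans ?_
    rw [PySem.Dict.keys_empty, PySem.Set.update_nil_left, PySem.Set.ofList_eq_self_of_nodup _ hn1]
  have hk2 : (t2.foldl
      (fun seen sc =>
        seen.insert sc.1
          (sc.2.foldl (fun (flags : PySem.Dict String (Bool × Bool)) cnv =>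
              flags.insert cnv ((flags.getD cnv (false, false)).1, true))
            (seen.getD sc.1 PySem.Dict.empty)))
      (t1.foldl
        (fun seen sc =>
          seen.insert sc.1
            (sc.2.foldl (fun (flags : PySem.Dict String (Bool × Bool)) cnv => flags.insert cnv (true, false))
              (seen.getD sc.1 PySem.Dict.empty)))
        PySem.Dict.empty)).keys = PySem.Set.update (t1.map Prod.fst) (t2.map Prod.fst) := by
    refine (PySem.Dict.keys_foldl_insert_key t2 Prod.fst
      (fun seen sc => sc.2.foldl (fun (flags : PySem.Dict String (Bool × Bool)) cnv =>
          flags.insert cnv ((flags.getD cnv (false, false)).1, true))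
        (seen.getD sc.1 PySem.Dict.empty)) _).trans ?_
    rw [hk1]
  have hnodk : (PySem.Set.update (t1.map Prod.fst) (t2.map Prod.fst)).Nodup :=
    PySem.Set.nodup_update _ _ hn1
  rw [PySem.Dict.items_eq_map_keys _ (by rw [hk2]; exact hnodk) PySem.Dict.empty, hk2]
  refine List.map_congr_left ?_
  intro s _
  refine congrArg (Prod.mk s) ?_
  have hseen1 : (t1.foldl
      (fun seen sc =>
        seen.insert sc.1
          (sc.2.foldl (fun (flags : PySem.Dict String (Bool × Bool)) cnv => flags.insert cnv (true, false))
            (seen.getD sc.1 PySem.Dict.empty)))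
      PySem.Dict.empty).getD s PySem.Dict.empty = pvF1 (pvGetL t1 s) := by
    refine (pv_getD_pass t1
      (fun f cs => cs.foldl (fun (flags : PySem.Dict String (Bool × Bool)) cnv => flags.insert cnv (true, false)) f)
      PySem.Dict.empty s hn1 PySem.Dict.empty).trans ?_
    have hL : pvGetL t1 s = ((PySem.Dict.mk t1).get? s).getD [] := by
      unfold pvGetL; rw [PySem.Dict.getD_eq_get?_getD]
    rw [hL]
    cases (PySem.Dict.mk t1).get? s <;> rfl
  refine (pv_getD_pass t2
    (fun f cs => cs.foldl (fun (flags : PySem.Dict String (Bool × Bool)) cnv =>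
        flags.insert cnv ((flags.getD cnv (false, false)).1, true)) f)
    PySem.Dict.empty s hn2 _).trans ?_
  rw [hseen1]
  have hL : pvGetL t2 s = ((PySem.Dict.mk t2).get? s).getD [] := by
    unfold pvGetL; rw [PySem.Dict.getD_eq_get?_getD]
  rw [hL]
  cases (PySem.Dict.mk t2).get? s <;> rfl

theorem pv_main (t1 t2 : List (String × List String)) (sig : List String) (hsig : sig.Nodup)
    (u1 u2 : PySem.Dict String (PySem.Set String))
    (h1 : ∀ s ∈ sig, u1.contains s = false) (h2 : ∀ s ∈ sig, u2.contains s = false) :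
    sig.foldl
        (fun (acc : PySem.Dict String (PySem.Set String) × PySem.Dict String (PySem.Set String)) samplename =>
          (if PySem.Set.len (PySem.Set.diff (pvAset t1 samplename) (pvAset t2 samplename)) > 0 then
            acc.1.insert samplename (PySem.Set.diff (pvAset t1 samplename) (pvAset t2 samplename)) else acc.1,
           if PySem.Set.len (PySem.Set.diff (pvAset t2 samplename) (pvAset t1 samplename)) > 0 then
            acc.2.insert samplename (PySem.Set.diff (pvAset t2 samplename) (pvAset t1 samplename)) else acc.2))
        (u1, u2) =
      sig.foldl
        (fun (u : PySem.Dict String (PySem.Set String) × PySem.Dict String (PySem.Set String)) s =>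
          (pvG (pvF1 (pvGetL t1 s)) (pvGetL t2 s)).items.foldl
            (fun (u : PySem.Dict String (PySem.Set String) × PySem.Dict String (PySem.Set String)) cf =>
              if cf.2.1 != cf.2.2 then
                if cf.2.1 then
                  (u.1.insert s (PySem.Set.add (u.1.getD s PySem.Set.empty) cf.1), u.2)
                else
                  (u.1, u.2.insert s (PySem.Set.add (u.2.getD s PySem.Set.empty) cf.1))
              else u)
            u)
        (u1, u2) := by
  induction sig generalizing u1 u2 with
  | nil => rfl
  | cons s sig ih =>
    rw [List.nodup_cons] at hsig
    rw [List.foldl_cons, List.foldl_cons,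
      pv_inner t1 t2 s u1 u2 (h1 s List.mem_cons_self) (h2 s List.mem_cons_self)]
    refine ih hsig.2 _ _ ?_ ?_
    · intro x hx
      have hxs : x ≠ s := fun h => hsig.1 (h ▸ hx)
      split_ifs with h
      · rw [PySem.Dict.contains_insert]
        simp [hxs, h1 x (List.mem_cons_of_mem s hx)]
      · exact h1 x (List.mem_cons_of_mem s hx)
    · intro x hx
      have hxs : x ≠ s := fun h => hsig.1 (h ▸ hx)
      split_ifs with h
      · rw [PySem.Dict.contains_insert]
        simp [hxs, h2 x (List.mem_cons_of_mem s hx)]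
      · exact h2 x (List.mem_cons_of_mem s hx)

-- ===== VERDICT (by name: the statement is the Claim_ definition above) =====
theorem determine_unique_array_cnvs_spec : Claim_equal_determine_unique_array_cnvs := by
  intro fd _ hPre
  obtain ⟨hc1, hc2, hn1, hn2⟩ := hPre
  rw [PySem.Dict.contains_eq_isSome_get?] at hc1 hc2
  obtain ⟨t1, hg1⟩ := Option.isSome_iff_exists.mp hc1
  obtain ⟨t2, hg2⟩ := Option.isSome_iff_exists.mp hc2
  rw [PySem.Dict.getD_eq_get?_getD, hg1] at hn1
  rw [PySem.Dict.getD_eq_get?_getD, hg2] at hn2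
  simp only [Option.getD_some] at hn1 hn2
  unfold Spec_determine_unique_array_cnvs determine_unique_array_cnvs determine_unique_array_cnvs_alt
  rw [hg1, hg2]
  simp only []
  rw [pv_samples_eq t1 t2 hn1, pv_seen2_items t1 t2 hn1 hn2, List.foldl_map]
  have hsig : (PySem.Set.update (t1.map Prod.fst) (t2.map Prod.fst)).Nodup :=
    PySem.Set.nodup_update _ _ hn1
  exact congrArg (fun p : PySem.Dict String (PySem.Set String) × PySem.Dict String (PySem.Set String) =>
      [("tool1", p.1.items), ("tool2", p.2.items)])
    (pv_main t1 t2 _ hsig PySem.Dict.empty PySem.Dict.empty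
      (fun s _ => by simp [PySem.Dict.contains_empty]) (fun s _ => by simp [PySem.Dict.contains_empty]))
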